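-- pv_equiv track=rewrite | github.com/Hasnain91169/ai-rag-evaluation-platform | python_service/main.py | best_rank
-- ===== SOURCE A (Python) =====
-- from typing import Any, Dict, List, Optional
--
-- def best_rank(ids: List[int], gold_ids: List[int]) -> Optional[int]:
--     if not ids or not gold_ids:
--         return None
--     gold_set = set(gold_ids)
--     for idx, chunk_id in enumerate(ids, start=1):
--         if chunk_id in gold_set:
--             return idx
--     return None
-- ===== SOURCE B (Python) =====
-- from typing import Any, Dict, List, Optional
--
-- def best_rank(ids: List[int], gold_ids: List[int]) -> Optional[int]:
--     pos = {}
--     for i, cid in enumerate(ids, start=1):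
--         if cid not in pos:
--             pos[cid] = i
--     ranks = [pos[g] for g in gold_ids if g in pos]
--     return min(ranks) if ranks else None
-- ===== Notes on version B (the rewrite author's own statement) =====
-- stated objective: alternative
-- what changed: Instead of scanning ids against a gold membership set and returning the first hit, B builds a first-occurrence position index over ids once and takes the minimum rank found by iterating over gold_ids, inverting the traversal.
import Mathlib
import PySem

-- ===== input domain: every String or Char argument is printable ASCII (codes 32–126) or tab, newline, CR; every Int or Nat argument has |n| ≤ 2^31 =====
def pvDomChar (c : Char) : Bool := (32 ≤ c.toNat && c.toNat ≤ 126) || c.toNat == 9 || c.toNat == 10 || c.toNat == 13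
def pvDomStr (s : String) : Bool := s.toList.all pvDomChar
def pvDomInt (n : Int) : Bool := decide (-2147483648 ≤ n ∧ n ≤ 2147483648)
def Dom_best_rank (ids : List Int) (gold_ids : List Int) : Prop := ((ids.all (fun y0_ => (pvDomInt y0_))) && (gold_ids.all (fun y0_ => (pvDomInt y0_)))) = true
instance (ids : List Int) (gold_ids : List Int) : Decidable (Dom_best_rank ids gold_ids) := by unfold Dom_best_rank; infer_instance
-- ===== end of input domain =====

-- B inverts A's traversal: it indexes ids by first-occurrence rank once, then minimises over gold_ids (alternative decomposition, same cost).

-- ===== PORT A =====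
-- the for-loop over enumerate(ids, start=1) with early return
def bestRankLoopA (gs : List Int) (idx : Int) : List Int → Option Int
  | [] => none
  | x :: xs => if x ∈ gs then some idx else bestRankLoopA gs (idx + 1) xs

def best_rank (ids : List Int) (gold_ids : List Int) : Option Int :=
  if ids = [] ∨ gold_ids = [] then none
  else bestRankLoopA (PySem.Set.ofList gold_ids) 1 ids

-- ===== PORT B =====
-- the for-loop filling pos = {cid: first 1-based index}
def buildPosB (i : Int) (xs : List Int) (d : PySem.Dict Int Int) : PySem.Dict Int Int :=
  match xs with
  | [] => d
  | x :: xs => buildPosB (i + 1) xs (if d.contains x then d else d.insert x i)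

def best_rank_alt (ids : List Int) (gold_ids : List Int) : Option Int :=
  let pos := buildPosB 1 ids PySem.Dict.empty
  let ranks := gold_ids.filterMap (fun g => pos.get? g)
  if ranks = [] then none else PySem.List.min? ranks (fun r => r)

-- ===== PRECONDITION & SPEC =====
def Spec_best_rank (ids : List Int) (gold_ids : List Int) (out : Option Int) : Prop := out = best_rank_alt ids gold_ids
instance (ids : List Int) (gold_ids : List Int) (out : Option Int) : Decidable (Spec_best_rank ids gold_ids out) := by unfold Spec_best_rank; infer_instance

-- ===== CLAIM (what is proved, stated in full; the proofs are below) =====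
def Claim_equal_best_rank : Prop := ∀ (ids : List Int) (gold_ids : List Int), Dom_best_rank ids gold_ids → Spec_best_rank ids gold_ids (best_rank ids gold_ids)

-- ===== LEMMAS AND PROOFS =====

-- the common characterisation: 1 + first index of an element of gold
def firstGoldRank (ids : List Int) (gold : List Int) : Option Int :=
  (ids.findIdx? (fun x => decide (x ∈ gold))).map (fun n : Nat => 1 + (n : Int))

theorem loopA_eq (gold : List Int) (ids : List Int) (i : Int) :
    bestRankLoopA gold i ids = (ids.findIdx? (fun x => decide (x ∈ gold))).map (fun n : Nat => i + (n : Int)) := by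
  induction ids generalizing i with
  | nil => simp [bestRankLoopA]
  | cons x xs ih =>
    simp only [bestRankLoopA, List.findIdx?_cons]
    by_cases hx : x ∈ gold
    · simp [hx]
    · simp only [hx, decide_false, if_false, ih]
      cases xs.findIdx? (fun x => decide (x ∈ gold)) with
      | none => rfl
      | some n => simp; ring

theorem best_rank_eq (ids gold : List Int) : best_rank ids gold = firstGoldRank ids gold := by
  unfold best_rank firstGoldRank
  by_cases hids : ids = []
  · subst hids; simp
  · by_cases hg : gold = []
    · subst hg
      rw [if_pos (Or.inr rfl)]
      rw [List.findIdx?_eq_none_iff.mpr (by intro x _; simp)]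
      rfl
    · rw [if_neg (by simp [hids, hg])]
      rw [loopA_eq]
      have hpred : (fun x => decide (x ∈ PySem.Set.ofList gold)) = (fun x => decide (x ∈ gold)) := by
        funext x; simp [PySem.Set.mem_ofList]
      rw [hpred]

theorem buildPos_get? (xs : List Int) (i : Int) (d : PySem.Dict Int Int) (k : Int) :
    (buildPosB i xs d).get? k =
      (d.get? k).or ((PySem.List.index? xs k).map (fun j : Nat => i + (j : Int))) := by
  induction xs generalizing i d with
  | nil => simp [buildPosB, PySem.List.index?]
  | cons x xs ih =>
    simp only [buildPosB, ih]
    by_cases hk : k = x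
    · subst hk
      rw [PySem.List.index?_cons_self]
      cases hget : d.get? k with
      | some v =>
        have hc : d.contains k = true := by
          rw [PySem.Dict.contains_eq_isSome_get?, hget]; rfl
        rw [if_pos hc, hget]
        rfl
      | none =>
        have hc : ¬ d.contains k = true := by
          rw [PySem.Dict.contains_eq_isSome_get?, hget]; simp
        rw [if_neg hc, PySem.Dict.get?_insert_self]
        simp
    · have hxk : x ≠ k := fun h => hk h.symm
      rw [PySem.List.index?_cons_of_ne xs hxk]
      have hd : (if d.contains x then d else d.insert x i).get? k = d.get? k := by
        split
        · rfl
        · exact PySem.Dict.get?_insert_of_ne d i hk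
      rw [hd, Option.map_map]
      have hfun : ((fun j : Nat => i + (j : Int)) ∘ fun x => x + 1) = (fun j : Nat => i + 1 + (j : Int)) := by
        funext j
        simp only [Function.comp_apply]
        push_cast
        ring
      rw [hfun]

theorem ranks_eq (ids gold : List Int) :
    gold.filterMap (fun g => (buildPosB 1 ids PySem.Dict.empty).get? g)
      = gold.filterMap (fun g => (PySem.List.index? ids g).map (fun j : Nat => 1 + (j : Int))) := by
  apply List.filterMap_congr
  intro g _
  rw [buildPos_get?, PySem.Dict.get?_empty, Option.none_or]

theorem best_rank_alt_eq (ids gold : List Int) : best_rank_alt ids gold = firstGoldRank ids gold := by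
  unfold best_rank_alt firstGoldRank
  simp only [ranks_eq]
  set ranks := gold.filterMap (fun g => (PySem.List.index? ids g).map (fun j : Nat => 1 + (j : Int))) with hranks
  cases hfi : ids.findIdx? (fun x => decide (x ∈ gold)) with
  | none =>
    have hnone : ∀ x ∈ ids, x ∉ gold := by
      intro x hx hxg
      have := List.findIdx?_eq_none_iff.mp hfi x hx
      simp [hxg] at this
    have hr : ranks = [] := by
      rw [hranks, List.filterMap_eq_nil_iff]
      intro g hg
      have hnone' : PySem.List.index? ids g = none :=
        (PySem.List.index?_eq_none_iff ids g).mpr (fun hmem => hnone g hmem hg)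
      simp only [hnone', Option.map_none]
    simp [hr]
  | some n =>
    obtain ⟨hn, hpn, hmin⟩ := List.findIdx?_eq_some_iff_getElem.mp hfi
    have hgn : ids[n] ∈ gold := by simpa using hpn
    have hmem : ids[n] ∈ ids := List.getElem_mem hn
    obtain ⟨m, hm⟩ := Option.isSome_iff_exists.mp ((PySem.List.index?_isSome_iff ids ids[n]).mpr hmem)
    obtain ⟨hmlt, hgm, hfirst⟩ := PySem.List.getElem_of_index?_eq_some hm
    have hmn : m = n := by
      rcases lt_trichotomy m n with h | h | h
      · have := hmin m h
        rw [hgm] at this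
        simp [hgn] at this
      · exact h
      · exact absurd rfl (hfirst n h)
    have hin : (1 + (n : Int)) ∈ ranks := by
      rw [hranks, List.mem_filterMap]
      exact ⟨ids[n], hgn, by rw [hm, hmn]; rfl⟩
    have hne : ranks ≠ [] := by
      intro h; rw [h] at hin; exact (List.not_mem_nil) hin
    have hlow : ∀ r ∈ ranks, (1 + (n : Int)) ≤ r := by
      intro r hr
      rw [hranks, List.mem_filterMap] at hr
      obtain ⟨g, hg, hgr⟩ := hr
      cases hidx : PySem.List.index? ids g with
      | none => rw [hidx] at hgr; simp at hgr
      | some j =>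
        rw [hidx] at hgr
        simp only [Option.map_some, Option.some.injEq] at hgr
        obtain ⟨hjlt, hgj, _⟩ := PySem.List.getElem_of_index?_eq_some hidx
        have hjn : n ≤ j := by
          by_contra hlt
          have := hmin j (Nat.lt_of_not_le hlt)
          rw [hgj] at this
          simp [hg] at this
        have : (n : Int) ≤ (j : Int) := by exact_mod_cast hjn
        omega
    rw [if_neg hne]
    cases hmq : PySem.List.min? ranks (fun r => r) with
    | none =>
      rw [PySem.List.min?_eq_none_iff] at hmq
      exact absurd hmq hne
    | some mv =>
      have h1 : (1 + (n : Int)) ≤ mv := hlow mv (PySem.List.min?_mem hmq)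
      have h2 : mv ≤ 1 + (n : Int) := PySem.List.min?_isMin hmq _ hin
      simp only [Option.map_some]
      congr 1
      omega

-- ===== VERDICT (by name: the statement is the Claim_ definition above) =====
theorem best_rank_spec : Claim_equal_best_rank := by
  intro ids gold _
  unfold Spec_best_rank
  rw [best_rank_eq, best_rank_alt_eq]
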